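-- pv_equiv track=rewrite | github.com/mikez321/practice_projects | other_challenges/python/three_words.py | three_words
-- ===== SOURCE A (Python) =====
-- def three_words(text: str) -> bool:
--     """
--     Given a string of text return true if it contains 3 successive words.
--
--     :param text: A string of text.  The text does not contain any numbers.
--     :return:  If the string contains 3 words in succession the function
--         returns true, otherwise it will return false.
--     """
--     cons_alpha = 0
--     for word in text.split():
--         if word.isalpha():
--             cons_alpha += 1
--             if cons_alpha == 3:
--                 return True
--         else:
--             cons_alpha = 0
--
--     return False
-- ===== SOURCE B (Python) =====
-- def three_words(text: str) -> bool:
--     words = text.split()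
--     return any(all(w.isalpha() for w in words[i:i + 3])
--                for i in range(len(words) - 2))
-- ===== Notes on version B (the rewrite author's own statement) =====
-- stated objective: idiomatic
-- what changed: Replaces the single-pass reset-on-failure counter with a sliding window: split once, then any/all over every overlapping triple words[i:i+3].
import Mathlib
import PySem

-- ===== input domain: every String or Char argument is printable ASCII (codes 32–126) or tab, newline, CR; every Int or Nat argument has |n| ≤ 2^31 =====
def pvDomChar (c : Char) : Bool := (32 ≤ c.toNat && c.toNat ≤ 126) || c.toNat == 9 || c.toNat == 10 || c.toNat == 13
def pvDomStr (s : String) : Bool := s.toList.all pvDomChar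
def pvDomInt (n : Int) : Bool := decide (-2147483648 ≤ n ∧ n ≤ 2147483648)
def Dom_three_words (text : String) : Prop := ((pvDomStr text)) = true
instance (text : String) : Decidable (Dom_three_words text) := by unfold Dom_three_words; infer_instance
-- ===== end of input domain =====

-- B replaces A's reset-on-failure counter with a sliding window over overlapping word triples (idiomatic any/all); same O(n) cost.


-- ===== PORT A =====
-- the for-loop with the reset-on-failure counter and the early return on cons_alpha == 3
def threeWordsLoop : List String → Int → Bool
  | [], _ => false
  | w :: ws, consAlpha =>
    if PySem.Str.strIsalpha w then
      if consAlpha + 1 == 3 then true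
      else threeWordsLoop ws (consAlpha + 1)
    else threeWordsLoop ws 0

def three_words (text : String) : Bool :=
  threeWordsLoop (PySem.Str.split₀ text) 0

-- ===== PORT B =====
def three_words_alt (text : String) : Bool :=
  let words := PySem.Str.split₀ text
  (PySem.List.pyRange 0 ((words.length : Int) - 2) 1).any fun i =>
    (PySem.List.slice words (some i) (some (i + 3))).all fun w => PySem.Str.strIsalpha w

-- ===== PRECONDITION & SPEC =====
def Spec_three_words (text : String) (out : Bool) : Prop := out = three_words_alt text
instance (text : String) (out : Bool) : Decidable (Spec_three_words text out) := by unfold Spec_three_words; infer_instance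

-- ===== CLAIM (what is proved, stated in full; the proofs are below) =====
def Claim_equal_three_words : Prop := ∀ (text : String), Dom_three_words text → Spec_three_words text (three_words text)

-- ===== LEMMAS AND PROOFS =====

-- pa ws k: the first k words exist and are all alphabetic
def pa : List String → Nat → Bool
  | _, 0 => true
  | [], _ + 1 => false
  | w :: ws, k + 1 => PySem.Str.strIsalpha w && pa ws k

-- win3 ws: some suffix of ws starts with three alphabetic words
def win3 : List String → Bool
  | [] => false
  | w :: ws => pa (w :: ws) 3 || win3 ws

theorem pa_succ_imp (ws : List String) (k : Nat) (h : pa ws (k + 1) = true) :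
    pa ws k = true := by
  induction ws generalizing k with
  | nil => simp [pa] at h
  | cons w ws ih =>
    cases k with
    | zero => rfl
    | succ k =>
      simp only [pa, Bool.and_eq_true] at h ⊢
      exact ⟨h.1, ih k h.2⟩

theorem pa_length (ws : List String) (k : Nat) (h : pa ws k = true) : k ≤ ws.length := by
  induction ws generalizing k with
  | nil => cases k with | zero => simp | succ k => simp [pa] at h
  | cons w ws ih =>
    cases k with
    | zero => simp
    | succ k =>
      simp only [pa, Bool.and_eq_true] at h
      simpa using ih k h.2

theorem pa_take (ws : List String) (h : 3 ≤ ws.length) :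
    (ws.take 3).all (fun w => PySem.Str.strIsalpha w) = pa ws 3 := by
  match ws, h with
  | a :: b :: c :: r, _ => simp [pa, List.all]

-- characterisation of A's loop: the counter is a credit of already-seen alphabetic words
theorem loop_eq (ws : List String) :
    threeWordsLoop ws 0 = win3 ws ∧
    threeWordsLoop ws 1 = (pa ws 2 || win3 ws) ∧
    threeWordsLoop ws 2 = (pa ws 1 || win3 ws) := by
  induction ws with
  | nil => refine ⟨rfl, ?_, ?_⟩ <;> simp [threeWordsLoop, pa, win3]
  | cons w ws ih =>
    obtain ⟨ih0, ih1, ih2⟩ := ih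
    have h21 := pa_succ_imp ws 1
    cases hw : PySem.Chars.strIsalpha w.toList <;>
      refine ⟨?_, ?_, ?_⟩ <;>
        simp [threeWordsLoop, win3, pa, hw, ih0, ih1, ih2] <;>
        cases h2 : pa ws 2 <;> cases h1 : pa ws 1 <;> cases h3 : win3 ws <;>
          simp_all

-- win3 as an existential over suffixes
theorem win3_iff (ws : List String) :
    win3 ws = true ↔ ∃ k, pa (ws.drop k) 3 = true := by
  induction ws with
  | nil =>
    simp only [win3, List.drop_nil]
    constructor
    · intro h; exact absurd h (by simp)
    · rintro ⟨k, hk⟩; simp [pa] at hk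
  | cons w ws ih =>
    simp only [win3, Bool.or_eq_true, ih]
    constructor
    · rintro (h | ⟨k, hk⟩)
      · exact ⟨0, h⟩
      · exact ⟨k + 1, by simpa using hk⟩
    · rintro ⟨k, hk⟩
      cases k with
      | zero => exact Or.inl (by simpa using hk)
      | succ k => exact Or.inr ⟨k, by simpa using hk⟩

-- B's window scan as the same existential
theorem alt_iff (text : String) :
    three_words_alt text = true ↔ ∃ k, pa ((PySem.Str.split₀ text).drop k) 3 = true := by
  unfold three_words_alt
  set ws := PySem.Str.split₀ text with hws
  simp only [List.any_eq_true]
  constructor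
  · rintro ⟨i, hi, hall⟩
    rw [PySem.List.mem_pyRange_one] at hi
    obtain ⟨hi0, hi2⟩ := hi
    obtain ⟨k, rfl⟩ := Int.eq_ofNat_of_zero_le hi0
    refine ⟨k, ?_⟩
    have hklen : (k : Int) + 3 ≤ (ws.length : Int) := by omega
    have hslice : PySem.List.slice ws (some (k : Int)) (some ((k : Int) + 3)) = (ws.drop k).take 3 := by
      have h := PySem.List.slice_natCast_add (xs := ws) (j := k) (n := 3)
      exact_mod_cast h
    rw [hslice] at hall
    rw [← pa_take _ (by simp; omega)]
    exact hall
  · rintro ⟨k, hk⟩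
    have hlen3 := pa_length _ _ hk
    have hklen : k + 3 ≤ ws.length := by
      have := List.length_drop (l := ws) (i := k)
      omega
    refine ⟨(k : Int), ?_, ?_⟩
    · rw [PySem.List.mem_pyRange_one]
      constructor
      · positivity
      · omega
    · have hslice : PySem.List.slice ws (some (k : Int)) (some ((k : Int) + 3)) = (ws.drop k).take 3 := by
        have h := PySem.List.slice_natCast_add (xs := ws) (j := k) (n := 3)
        exact_mod_cast h
      rw [hslice, pa_take _ (by simpa using hlen3)]
      exact hk

-- ===== VERDICT (by name: the statement is the Claim_ definition above) =====
theorem three_words_spec : Claim_equal_three_words := by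
  intro text _
  unfold Spec_three_words three_words
  rw [(loop_eq (PySem.Str.split₀ text)).1, Bool.eq_iff_iff, win3_iff, alt_iff]
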